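-- pv_equiv track=rewrite | github.com/adamasb/Mavi | src/irlc/ex00/old/sample0.py | swaps
-- ===== SOURCE A (Python) =====
-- def swaps(ss):
--     swaps = 0
--     dx = len(ss)-2
--     while True:
--         if ss[dx] == ss[dx+1]:
--             dx -= 1
--         elif ss[dx] == 1 and ss[dx+1] == 0:
--             swaps += 1
--             ss[dx] = 0
--             ss[dx+1] = 1
--             dx += 1
--             dx = min(len(ss)-2, dx)
--         else:
--             dx -= 1
--         if dx == -1:
--             break
--     return swaps
-- ===== SOURCE B (Python) =====
-- def swaps(ss):
--     # Single left-to-right pass: a run of 1s bubbles right past 0s; any value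
--     # other than 0/1 is a wall that resets the run. Each 0 costs one swap per
--     # 1 currently to its left within the same wall-free segment.
--     ones = 0
--     total = 0
--     for x in ss:
--         if x == 1:
--             ones += 1
--         elif x == 0:
--             total += ones
--         else:
--             ones = 0
--     return total
-- ===== Notes on version B (the rewrite author's own statement) =====
-- stated objective: faster
-- what changed: A bubbles each adjacent (1,0) pair right-to-left with backtracking (and mutates its argument); B computes the same count in one pass by accumulating the number of 1s since the last non-binary element and adding it on each 0.
import Mathlib
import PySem

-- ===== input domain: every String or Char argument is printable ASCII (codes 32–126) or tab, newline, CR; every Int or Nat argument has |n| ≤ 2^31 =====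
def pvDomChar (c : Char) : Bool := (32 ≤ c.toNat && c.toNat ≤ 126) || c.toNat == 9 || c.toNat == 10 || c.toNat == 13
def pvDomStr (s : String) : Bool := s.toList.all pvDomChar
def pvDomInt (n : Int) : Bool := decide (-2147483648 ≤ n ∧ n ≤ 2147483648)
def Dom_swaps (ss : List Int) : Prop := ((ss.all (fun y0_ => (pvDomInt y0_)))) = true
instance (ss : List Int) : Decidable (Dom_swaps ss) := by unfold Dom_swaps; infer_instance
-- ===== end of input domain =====

-- B replaces A's quadratic right-to-left adjacent-swap bubbling by a single accumulating
-- pass (asymptotically faster); A also mutates its argument in place — the equivalence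
-- proved here is about the RETURN value only (B does not mutate).

-- ===== PORT A =====
-- ss[i]: the index is in range on every access the loop performs under Pre_ (2 ≤ len keeps
-- 0 ≤ dx ≤ len-2 at each access); the .getD 0 only totalizes the port outside Pre_.
def pyAt (ss : List Int) (i : Int) : Int := (PySem.List.pyGet? ss i).getD 0

-- ss[i] = v ; i is nonnegative at every assignment the loop performs under Pre_.
def setAt (ss : List Int) (i : Int) (v : Int) : List Int := ss.set i.toNat v

-- literal transcription of A's while-loop; fuel is only a totality guard, and the fuel
-- `swaps` supplies is proved sufficient on every input satisfying Pre_.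
def loopA (ss : List Int) (dx cnt : Int) : Nat → Int
  | 0 => cnt
  | fuel + 1 =>
    if pyAt ss dx = pyAt ss (dx + 1) then
      (if dx - 1 = -1 then cnt else loopA ss (dx - 1) cnt fuel)
    else if pyAt ss dx = 1 ∧ pyAt ss (dx + 1) = 0 then
      (if min ((ss.length : Int) - 2) (dx + 1) = -1 then cnt + 1
       else loopA (setAt (setAt ss dx 0) (dx + 1) 1)
              (min ((ss.length : Int) - 2) (dx + 1)) (cnt + 1) fuel)
    else
      (if dx - 1 = -1 then cnt else loopA ss (dx - 1) cnt fuel)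

def swaps (ss : List Int) : Int :=
  loopA ss ((ss.length : Int) - 2) 0 (2 * ss.length * ss.length + ss.length + 2)

-- ===== PORT B =====
def stepB (s : Int × Int) (x : Int) : Int × Int :=
  if x = 1 then (s.1 + 1, s.2) else if x = 0 then (s.1, s.2 + s.1) else (0, s.2)

def swaps_alt (ss : List Int) : Int := (ss.foldl stepB (0, 0)).2

-- ===== PRECONDITION & SPEC =====
-- A raises IndexError on every list of length < 2; exactly those inputs are excluded.
def Pre_swaps (ss : List Int) : Prop := 2 ≤ ss.length
instance (ss : List Int) : Decidable (Pre_swaps ss) := by unfold Pre_swaps; infer_instance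
def pvWitness_swaps : List Int := [1, 0, 1]

def Spec_swaps (ss : List Int) (out : Int) : Prop := out = swaps_alt ss
instance (ss : List Int) (out : Int) : Decidable (Spec_swaps ss out) := by unfold Spec_swaps; infer_instance

-- ===== CLAIM (what is proved, stated in full; the proofs are below) =====
def Claim_equal_swaps : Prop := ∀ (ss : List Int), Dom_swaps ss → Pre_swaps ss → Spec_swaps ss (swaps ss)

-- ===== LEMMAS AND PROOFS =====

-- "no adjacent (1,0) pair" on a list
def NoAdj : List Int → Prop
  | a :: b :: l => ¬(a = 1 ∧ b = 0) ∧ NoAdj (b :: l)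
  | _ => True

def NoAdjAfter (ss : List Int) (dx : Int) : Prop := NoAdj (ss.drop (dx + 1).toNat)

lemma noAdj_tail {x : Int} {l : List Int} (h : NoAdj (x :: l)) : NoAdj l := by
  cases l with
  | nil => trivial
  | cons b t => exact h.2

lemma noAdj_cons {x : Int} {l : List Int}
    (h1 : ∀ y, l.head? = some y → ¬(x = 1 ∧ y = 0)) (h2 : NoAdj l) : NoAdj (x :: l) := by
  cases l with
  | nil => trivial
  | cons b t => exact ⟨h1 b rfl, h2⟩

lemma noAdj_short (l : List Int) (h : l.length ≤ 1) : NoAdj l := by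
  match l with
  | [] => trivial
  | [a] => trivial
  | a :: b :: t => simp at h

lemma fold_shift (l : List Int) : ∀ (o t c : Int),
    l.foldl stepB (o, t + c) = ((l.foldl stepB (o, t)).1, (l.foldl stepB (o, t)).2 + c) := by
  induction l with
  | nil => intro o t c; simp
  | cons x xs ih =>
    intro o t c
    simp only [List.foldl_cons, stepB]
    split_ifs with h1 h2
    · exact ih (o + 1) t c
    · have h : t + c + o = (t + o) + c := by ring
      rw [h]; exact ih o (t + o) c
    · exact ih 0 t c

lemma fold_nonneg (l : List Int) : ∀ (o t : Int), 0 ≤ o →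
    0 ≤ (l.foldl stepB (o, t)).1 ∧ t ≤ (l.foldl stepB (o, t)).2 := by
  induction l with
  | nil => intro o t ho; simpa using ho
  | cons x xs ih =>
    intro o t ho
    simp only [List.foldl_cons, stepB]
    split_ifs with h1 h2
    · exact ih (o + 1) t (by omega)
    · exact ⟨(ih o (t + o) ho).1, le_trans (by omega) (ih o (t + o) ho).2⟩
    · exact ih 0 t le_rfl

lemma fold_bound (l : List Int) : ∀ (o t : Int), 0 ≤ o →
    (l.foldl stepB (o, t)).1 ≤ o + l.length ∧
    (l.foldl stepB (o, t)).2 ≤ t + l.length * (o + l.length) := by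
  induction l with
  | nil => intro o t ho; simp
  | cons x xs ih =>
    intro o t ho
    have hn : (0 : Int) ≤ xs.length := by positivity
    simp only [List.foldl_cons, stepB, List.length_cons]
    push_cast
    split_ifs with h1 h2
    · obtain ⟨ih1, ih2⟩ := ih (o + 1) t (by omega)
      exact ⟨by omega, by nlinarith⟩
    · obtain ⟨ih1, ih2⟩ := ih o (t + o) ho
      exact ⟨by omega, by nlinarith⟩
    · obtain ⟨ih1, ih2⟩ := ih 0 t le_rfl
      exact ⟨by omega, by nlinarith⟩

lemma fold_noadj (l : List Int) : ∀ (o t : Int), NoAdj l →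
    (l.head? = some 0 → o = 0) → (l.foldl stepB (o, t)).2 = t := by
  induction l with
  | nil => intro o t _ _; rfl
  | cons x xs ih =>
    intro o t hch hh
    have hch' : NoAdj xs := noAdj_tail hch
    simp only [List.foldl_cons, stepB]
    split_ifs with h1 h2
    · refine ih (o + 1) t hch' ?_
      intro hx0
      cases xs with
      | nil => simp at hx0
      | cons y t' =>
        simp at hx0
        exact absurd ⟨h1, hx0⟩ hch.1
    · have ho : o = 0 := hh (by simp [h2])
      subst ho
      rw [ih 0 (t + 0) hch' (fun _ => rfl)]; ring
    · exact ih 0 t hch' (fun _ => rfl)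

lemma invB_nonneg (ss : List Int) : 0 ≤ swaps_alt ss := (fold_nonneg ss 0 0 le_rfl).2

lemma invB_bound (ss : List Int) : swaps_alt ss ≤ (ss.length : Int) * ss.length := by
  have h := (fold_bound ss 0 0 le_rfl).2
  simpa [swaps_alt] using h

lemma invB_zero (ss : List Int) (h : NoAdj ss) : swaps_alt ss = 0 :=
  fold_noadj ss 0 0 h (fun _ => rfl)

-- swapping an adjacent (1,0) into (0,1) lowers B's count by exactly one
lemma invB_swap (l₁ l₂ : List Int) :
    swaps_alt (l₁ ++ 1 :: 0 :: l₂) = swaps_alt (l₁ ++ 0 :: 1 :: l₂) + 1 := by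
  unfold swaps_alt
  rw [List.foldl_append, List.foldl_append]
  set s := l₁.foldl stepB (0, 0) with hs
  have e1 : (1 :: 0 :: l₂).foldl stepB s = l₂.foldl stepB (s.1 + 1, (s.2 + s.1) + 1) := by
    simp only [List.foldl_cons, stepB]
    norm_num
    ring_nf
  have e2 : (0 :: 1 :: l₂).foldl stepB s = l₂.foldl stepB (s.1 + 1, s.2 + s.1) := by
    simp only [List.foldl_cons, stepB]
    norm_num
  rw [e1, e2, fold_shift l₂ (s.1 + 1) (s.2 + s.1) 1]

lemma set_mid (l₁ : List Int) (a b u v : Int) (l₂ : List Int) :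
    ((l₁ ++ a :: b :: l₂).set l₁.length u).set (l₁.length + 1) v = l₁ ++ u :: v :: l₂ := by
  induction l₁ with
  | nil => simp
  | cons x xs ih => simpa using ih

-- main loop invariant: with no adjacent (1,0) to the right of dx and enough fuel,
-- the loop adds exactly B's count to the accumulator
lemma loop_main : ∀ (fuel : Nat) (ss : List Int) (dx cnt : Int),
    0 ≤ dx → dx ≤ (ss.length : Int) - 2 → NoAdjAfter ss dx →
    2 * swaps_alt ss + dx + 1 ≤ fuel →
    loopA ss dx cnt fuel = cnt + swaps_alt ss := by
  intro fuel
  induction fuel with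
  | zero =>
    intro ss dx cnt h0 _ _ hf
    have h := invB_nonneg ss
    simp only [Nat.cast_zero] at hf
    omega
  | succ fuel ih =>
    intro ss dx cnt h0 h2 hna hf
    lift dx to ℕ using h0 with k hk
    have hlen : (2 : Int) ≤ ss.length := by omega
    have hkn : k < ss.length := by omega
    have hk1 : k + 1 < ss.length := by omega
    have hcast : ((k : Int) + 1) = ((k + 1 : ℕ) : Int) := by push_cast; ring
    have hget1 : pyAt ss (k : Int) = ss[k] := by
      simp [pyAt, List.getElem?_eq_getElem hkn]
    have hget2 : pyAt ss ((k : Int) + 1) = ss[k + 1] := by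
      rw [pyAt, hcast]
      simp only [PySem.List.pyGet?_natCast, List.getElem?_eq_getElem hk1, Option.getD_some]
    have hdrop : ss.drop k = ss[k] :: ss.drop (k + 1) := List.drop_eq_getElem_cons hkn
    have hdrop1 : ss.drop (k + 1) = ss[k + 1] :: ss.drop (k + 2) := List.drop_eq_getElem_cons hk1
    have hnadrop : NoAdj (ss.drop (k + 1)) := by
      have ht : ((k : Int) + 1).toNat = k + 1 := by omega
      simpa [NoAdjAfter, ht] using hna
    -- the two "move left" branches share this computation
    have left : ¬(ss[k] = 1 ∧ ss[k + 1] = 0) →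
        (if (k : Int) - 1 = -1 then cnt else loopA ss ((k : Int) - 1) cnt fuel)
          = cnt + swaps_alt ss := by
      intro hrel
      have hchain : NoAdj (ss.drop k) := by
        rw [hdrop]
        refine noAdj_cons ?_ hnadrop
        intro y hy
        have h4 : ss[k + 1]? = some y := by simpa using hy
        rw [List.getElem?_eq_getElem hk1, Option.some.injEq] at h4
        omega
      by_cases hb : (k : Int) - 1 = -1
      · rw [if_pos hb]
        have hk0 : k = 0 := by omega
        have hall : NoAdj ss := by simpa [hk0] using hchain
        rw [invB_zero ss hall]; ring
      · rw [if_neg hb]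
        refine ih ss ((k : Int) - 1) cnt (by omega) (by omega) ?_ (by push_cast at hf ⊢; omega)
        have ht : ((k : Int) - 1 + 1).toNat = k := by omega
        simpa [NoAdjAfter, ht] using hchain
    rw [loopA]
    by_cases hc1 : pyAt ss (k : Int) = pyAt ss ((k : Int) + 1)
    · rw [if_pos hc1]
      refine left ?_
      rw [hget1, hget2] at hc1
      rw [hc1]
      rintro ⟨ha, hb⟩; omega
    · rw [if_neg hc1]
      by_cases hc2 : pyAt ss (k : Int) = 1 ∧ pyAt ss ((k : Int) + 1) = 0
      · -- swap branch
        rw [if_pos hc2]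
        obtain ⟨ha1, ha0⟩ := hc2
        rw [hget1] at ha1; rw [hget2] at ha0
        set l₁ := ss.take k with hl1
        set l₂ := ss.drop (k + 2) with hl2
        have hlen1 : l₁.length = k := by rw [hl1]; simp; omega
        have hss : ss = l₁ ++ 1 :: 0 :: l₂ := by
          conv_lhs => rw [← List.take_append_drop k ss]
          rw [hdrop, hdrop1, ha1, ha0]
        have hss' : setAt (setAt ss (k : Int) 0) ((k : Int) + 1) 1 = l₁ ++ 0 :: 1 :: l₂ := by
          have ht1 : ((k : Int)).toNat = k := by omega
          have ht2 : ((k : Int) + 1).toNat = k + 1 := by omega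
          rw [setAt, setAt, ht1, ht2, ← hlen1]
          conv_lhs => rw [hss]
          exact set_mid l₁ 1 0 0 1 l₂
        have hlen' : ((l₁ ++ 0 :: 1 :: l₂).length : Int) = (ss.length : Int) := by
          conv_rhs => rw [hss]
          simp
        have hinv : swaps_alt ss = swaps_alt (l₁ ++ 0 :: 1 :: l₂) + 1 := by
          conv_lhs => rw [hss]
          exact invB_swap l₁ l₂
        have hmin0 : (0 : Int) ≤ min ((ss.length : Int) - 2) ((k : Int) + 1) := by omega
        rw [if_neg (by omega)]
        rw [hss']
        have hnew : NoAdjAfter (l₁ ++ 0 :: 1 :: l₂) (min ((ss.length : Int) - 2) ((k : Int) + 1)) := by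
          unfold NoAdjAfter
          by_cases hcap : (k : Int) + 1 ≤ (ss.length : Int) - 2
          · have ht : (min ((ss.length : Int) - 2) ((k : Int) + 1) + 1).toNat = k + 2 := by omega
            rw [ht]
            have he : (l₁ ++ 0 :: 1 :: l₂).drop (k + 2) = l₂ := by
              have h2' : k + 2 = l₁.length + 2 := by omega
              rw [h2', show l₁.length + 2 = (l₁ ++ [0, 1]).length by simp,
                show l₁ ++ 0 :: 1 :: l₂ = (l₁ ++ [0, 1]) ++ l₂ by simp,
                List.drop_left]
            rw [he, hl2]
            have h3 := hnadrop
            rw [hdrop1] at h3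
            exact noAdj_tail h3
          · have ht : (min ((ss.length : Int) - 2) ((k : Int) + 1) + 1).toNat = k + 1 := by omega
            rw [ht]
            have hl2nil : l₂ = [] := by
              rw [hl2]
              apply List.drop_eq_nil_of_le
              omega
            have he : (l₁ ++ 0 :: 1 :: l₂).drop (k + 1) = [1] := by
              rw [hl2nil, show k + 1 = l₁.length + 1 by omega,
                show l₁ ++ 0 :: 1 :: ([] : List Int) = (l₁ ++ [0]) ++ [1] by simp,
                show l₁.length + 1 = (l₁ ++ [0]).length by simp,
                List.drop_left]
            rw [he]
            trivial
        have hrec := ih (l₁ ++ 0 :: 1 :: l₂) (min ((ss.length : Int) - 2) ((k : Int) + 1)) (cnt + 1)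
          hmin0 (by rw [hlen']; omega) hnew
          (by have hnn := invB_nonneg ss; push_cast at hf ⊢; omega)
        rw [hrec, hinv]; ring
      · rw [if_neg hc2]
        refine left ?_
        rw [hget1, hget2] at hc2
        exact hc2

-- ===== VERDICT (by name: the statement is the Claim_ definition above) =====
theorem swaps_spec : Claim_equal_swaps := by
  intro ss _ hpre
  unfold Spec_swaps swaps
  have hlen : 2 ≤ ss.length := hpre
  have hb := invB_bound ss
  have h0 := invB_nonneg ss
  have h := loop_main (2 * ss.length * ss.length + ss.length + 2) ss ((ss.length : Int) - 2) 0
    (by omega) (by omega)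
    (by
      unfold NoAdjAfter
      apply noAdj_short
      have ht : ((ss.length : Int) - 2 + 1).toNat = ss.length - 1 := by omega
      rw [ht, List.length_drop]
      omega)
    (by push_cast; nlinarith)
  omega
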